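-- pv_equiv track=rewrite | github.com/amol-ship-it/agi-core | grammars/arc.py | upscale_pattern
-- ===== SOURCE A (Python) =====
-- Grid = list[list[int]]
--
-- def upscale_pattern(grid: Grid) -> Grid:
--     """If grid is small (<=5x5), upscale by treating each cell as the grid itself."""
--     h, w = len(grid), len(grid[0])
--     if h > 5 or w > 5 or h == 0 or w == 0:
--         return [row[:] for row in grid]
--     # Each non-zero cell becomes a copy of the entire grid
--     new_h = h * h
--     new_w = w * w
--     result = [[0] * new_w for _ in range(new_h)]
--     for r in range(h):
--         for c in range(w):
--             if grid[r][c] != 0: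
--                 for ir in range(h):
--                     for ic in range(w):
--                         result[r * h + ir][c * w + ic] = grid[ir][ic]
--     return result
-- ===== SOURCE B (Python) =====
-- def upscale_pattern(grid):
--     """If grid is small (<=5x5), upscale by treating each cell as the grid itself."""
--     h, w = len(grid), len(grid[0])
--     if h > 5 or w > 5 or h == 0 or w == 0:
--         return [row[:] for row in grid]
--     # Compute every output cell directly by decoding its block / offset with div/mod.
--     return [[grid[R % h][C % w] if grid[R // h][C // w] != 0 else 0
--              for C in range(w * w)]
--             for R in range(h * h)]
-- ===== Notes on version B (the rewrite author's own statement) =====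
-- stated objective: simpler
-- what changed: Replaces the zero-initialized result mutated by a quadruple block-copy loop over source cells with a single comprehension over output cells that decodes each position (R,C) via div/mod into block index and offset.
import Mathlib
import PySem

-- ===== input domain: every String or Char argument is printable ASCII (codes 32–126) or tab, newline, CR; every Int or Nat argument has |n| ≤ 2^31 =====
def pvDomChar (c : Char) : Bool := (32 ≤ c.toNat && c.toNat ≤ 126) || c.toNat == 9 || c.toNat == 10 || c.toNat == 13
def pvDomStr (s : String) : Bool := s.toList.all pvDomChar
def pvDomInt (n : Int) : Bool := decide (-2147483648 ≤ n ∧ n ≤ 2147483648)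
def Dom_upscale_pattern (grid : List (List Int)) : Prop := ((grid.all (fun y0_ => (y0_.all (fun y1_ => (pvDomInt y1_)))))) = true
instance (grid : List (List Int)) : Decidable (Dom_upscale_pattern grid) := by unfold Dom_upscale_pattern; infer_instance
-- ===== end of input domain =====

-- B replaces A's zero-initialized result mutated by a quadruple block-copy loop with a
-- single comprehension over output cells decoding (R,C) by div/mod; same cost, plainer code.

-- ===== PORT A =====
-- result[i][j] = v (in-range assignment into the mutable result matrix)
def pvSetCell (res : List (List Int)) (i j : Nat) (v : Int) : List (List Int) :=
  res.set i ((res.getD i []).set j v)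

def upscale_pattern (grid : List (List Int)) : List (List Int) :=
  let h := grid.length
  let w := (grid.headD []).length
  if h > 5 ∨ w > 5 ∨ h = 0 ∨ w = 0 then
    grid.map (fun row => row)
  else
    (List.range h).foldl (fun res r =>
      (List.range w).foldl (fun res c =>
        if (grid.getD r []).getD c 0 ≠ 0 then
          (List.range h).foldl (fun res ir =>
            (List.range w).foldl (fun res ic =>
              pvSetCell res (r * h + ir) (c * w + ic) ((grid.getD ir []).getD ic 0)) res) res
        else res) res)
      (List.replicate (h * h) (List.replicate (w * w) 0))

-- ===== PORT B =====
def upscale_pattern_alt (grid : List (List Int)) : List (List Int) :=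
  let h := grid.length
  let w := (grid.headD []).length
  if h > 5 ∨ w > 5 ∨ h = 0 ∨ w = 0 then
    grid.map (fun row => row)
  else
    (List.range (h * h)).map (fun R =>
      (List.range (w * w)).map (fun C =>
        if (grid.getD (R / h) []).getD (C / w) 0 ≠ 0 then
          (grid.getD (R % h) []).getD (C % w) 0
        else 0))

-- ===== PRECONDITION & SPEC =====
-- Pre_ excludes exactly the inputs on which the Python A raises IndexError: the empty grid
-- (grid[0]), and small grids (h ≤ 5, 0 < w ≤ 5) containing a row shorter than len(grid[0]).
def Pre_upscale_pattern (grid : List (List Int)) : Prop :=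
  grid ≠ [] ∧
    (grid.length > 5 ∨ (grid.headD []).length > 5 ∨ (grid.headD []).length = 0 ∨
      ∀ row ∈ grid, (grid.headD []).length ≤ row.length)
instance (grid : List (List Int)) : Decidable (Pre_upscale_pattern grid) := by
  unfold Pre_upscale_pattern; infer_instance

def pvWitness_upscale_pattern : List (List Int) := [[1, 0], [0, 2]]

def Spec_upscale_pattern (grid : List (List Int)) (out : List (List Int)) : Prop := out = upscale_pattern_alt grid
instance (grid : List (List Int)) (out : List (List Int)) : Decidable (Spec_upscale_pattern grid out) := by unfold Spec_upscale_pattern; infer_instance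

-- ===== CLAIM (what is proved, stated in full; the proofs are below) =====
def Claim_equal_upscale_pattern : Prop := ∀ (grid : List (List Int)), Dom_upscale_pattern grid → Pre_upscale_pattern grid → Spec_upscale_pattern grid (upscale_pattern grid)

-- ===== LEMMAS AND PROOFS =====

-- res represents the abstract (h*h) × (w*w) matrix f
def pvRep (h w : Nat) (res : List (List Int)) (f : Nat → Nat → Int) : Prop :=
  res.length = h * h ∧ ∀ R, R < h * h →
    (res.getD R []).length = w * w ∧ ∀ C, C < w * w → (res.getD R []).getD C 0 = f R C

theorem pvRep_init (h w : Nat) :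
    pvRep h w (List.replicate (h * h) (List.replicate (w * w) 0)) (fun _ _ => 0) := by
  refine ⟨by simp, fun R hR => ?_⟩
  constructor <;> simp [List.getD_eq_getElem?_getD, hR]

theorem pvRep_ext {h w : Nat} {res : List (List Int)} {f g : Nat → Nat → Int}
    (hr : pvRep h w res f) (hfg : ∀ R C, R < h * h → C < w * w → f R C = g R C) :
    pvRep h w res g := by
  refine ⟨hr.1, fun R hR => ⟨(hr.2 R hR).1, fun C hC => ?_⟩⟩
  rw [(hr.2 R hR).2 C hC, hfg R C hR hC]

theorem pvSetD_self {α : Type} (l : List α) (i : Nat) (v d : α) (h : i < l.length) :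
    (l.set i v).getD i d = v := by
  simp [List.getD_eq_getElem?_getD, h]

theorem pvSetD_ne {α : Type} (l : List α) (i j : Nat) (v d : α) (h : i ≠ j) :
    (l.set i v).getD j d = l.getD j d := by
  simp [List.getD_eq_getElem?_getD, List.getElem?_set_ne h]

theorem pvRep_set {h w : Nat} {res : List (List Int)} {f : Nat → Nat → Int}
    (hr : pvRep h w res f) {i j : Nat} (hi : i < h * h) (hj : j < w * w) (v : Int) :
    pvRep h w (pvSetCell res i j v) (fun R C => if R = i ∧ C = j then v else f R C) := by
  obtain ⟨hlen, hcell⟩ := hr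
  have hi' : i < res.length := by omega
  refine ⟨by simp [pvSetCell, hlen], fun R hR => ?_⟩
  by_cases hRi : R = i
  · subst hRi
    have hrow : (pvSetCell res R j v).getD R [] = (res.getD R []).set j v :=
      pvSetD_self res R _ [] hi'
    have hjlen : j < (res.getD R []).length := by rw [(hcell R hR).1]; omega
    rw [hrow]
    refine ⟨by rw [List.length_set]; exact (hcell R hR).1, fun C hC => ?_⟩
    by_cases hCj : C = j
    · subst hCj
      rw [pvSetD_self _ _ _ _ hjlen]; simp
    · rw [pvSetD_ne _ _ _ _ _ (Ne.symm hCj), (hcell R hR).2 C hC]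
      simp [hCj]
  · have hrow : (pvSetCell res i j v).getD R [] = res.getD R [] :=
      pvSetD_ne res i R _ [] (fun he => hRi he.symm)
    rw [hrow]
    refine ⟨(hcell R hR).1, fun C hC => ?_⟩
    rw [(hcell R hR).2 C hC]; simp [hRi]

-- division facts used to decode block/offset positions
theorem pvBlockDiv {h r i : Nat} (hh : 0 < h) (hi : i < h) : (r * h + i) / h = r := by
  rw [Nat.mul_comm r h, Nat.mul_add_div hh, Nat.div_eq_of_lt hi]; omega
theorem pvBlockMod {h r i : Nat} (hi : i < h) : (r * h + i) % h = i := by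
  rw [Nat.mul_comm r h, Nat.mul_add_mod]; exact Nat.mod_eq_of_lt hi
theorem pvBlockEq {h r i R : Nat} (hh : 0 < h) (hi : i < h) :
    R = r * h + i ↔ R / h = r ∧ R % h = i := by
  constructor
  · rintro rfl; exact ⟨pvBlockDiv hh hi, pvBlockMod hi⟩
  · rintro ⟨h1, h2⟩
    rw [← h1, ← h2]
    exact (Nat.div_add_mod' R h).symm

-- innermost loop over ic: paints row r*h+ir of block column c
theorem pvInnerCols {h w : Nat} (grid : List (List Int)) (hw : 0 < w)
    {r c ir : Nat} (hc : c < w)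
    {res : List (List Int)} {f : Nat → Nat → Int} (hi : r * h + ir < h * h)
    (hr : pvRep h w res f) (m : Nat) (hm : m ≤ w) :
    pvRep h w ((List.range m).foldl (fun res ic =>
        pvSetCell res (r * h + ir) (c * w + ic) ((grid.getD ir []).getD ic 0)) res)
      (fun R C => if R = r * h + ir ∧ C / w = c ∧ C % w < m then
          (grid.getD ir []).getD (C % w) 0 else f R C) := by
  induction m with
  | zero => simpa using pvRep_ext hr (by intro R C _ _; simp)
  | succ n ih =>
    have hn : n ≤ w := by omega
    rw [List.range_succ, List.foldl_append, List.foldl_cons, List.foldl_nil]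
    have hnw : n < w := by omega
    have hcw : c * w + n < w * w := by
      have h2 : (c + 1) * w ≤ w * w := Nat.mul_le_mul hc (Nat.le_refl w)
      have h3 : (c + 1) * w = c * w + w := by ring
      omega
    refine pvRep_ext (pvRep_set (ih hn) hi hcw _) ?_
    intro R C _ _
    by_cases h1 : R = r * h + ir ∧ C = c * w + n
    · obtain ⟨rfl, rfl⟩ := h1
      simp [pvBlockDiv hw hnw, pvBlockMod hnw]
    · rw [if_neg h1]
      by_cases h2 : R = r * h + ir ∧ C / w = c ∧ C % w < n + 1
      · rw [if_pos h2, if_pos]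
        obtain ⟨hR, hCd, hCm⟩ := h2
        have : C % w ≠ n := by
          intro he
          exact h1 ⟨hR, by rw [(pvBlockEq hw hnw).2 ⟨hCd, he⟩]⟩
        exact ⟨hR, hCd, by omega⟩
      · rw [if_neg h2, if_neg]
        intro ⟨hR, hCd, hCm⟩
        exact h2 ⟨hR, hCd, by omega⟩

-- loop over ir: paints the whole block (r,c)
theorem pvInnerRows {h w : Nat} (grid : List (List Int)) (hh : 0 < h) (hw : 0 < w)
    {r c : Nat} (hrh : r < h) (hc : c < w)
    {res : List (List Int)} {f : Nat → Nat → Int}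
    (hr : pvRep h w res f) (m : Nat) (hm : m ≤ h) :
    pvRep h w ((List.range m).foldl (fun res ir =>
        (List.range w).foldl (fun res ic =>
          pvSetCell res (r * h + ir) (c * w + ic) ((grid.getD ir []).getD ic 0)) res) res)
      (fun R C => if R / h = r ∧ R % h < m ∧ C / w = c then
          (grid.getD (R % h) []).getD (C % w) 0 else f R C) := by
  induction m with
  | zero => simpa using pvRep_ext hr (by intro R C _ _; simp)
  | succ n ih =>
    have hn : n ≤ h := by omega
    have hnh : n < h := by omega
    rw [List.range_succ, List.foldl_append, List.foldl_cons, List.foldl_nil]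
    have hRlt : r * h + n < h * h := by
      have h2 : (r + 1) * h ≤ h * h := Nat.mul_le_mul hrh (Nat.le_refl h)
      have h3 : (r + 1) * h = r * h + h := by ring
      omega
    refine pvRep_ext (pvInnerCols grid hw hc hRlt (ih hn) w le_rfl) ?_
    intro R C _ hCw
    by_cases h1 : R = r * h + n ∧ C / w = c ∧ C % w < w
    · obtain ⟨rfl, hCd, _⟩ := h1
      rw [if_pos ⟨rfl, hCd, Nat.mod_lt _ hw⟩,
        if_pos ⟨pvBlockDiv hh hnh, by rw [pvBlockMod hnh]; omega, hCd⟩, pvBlockMod hnh]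
    · rw [if_neg h1]
      by_cases h2 : R / h = r ∧ R % h < n ∧ C / w = c
      · rw [if_pos h2, if_pos ⟨h2.1, by omega, h2.2.2⟩]
      · rw [if_neg h2, if_neg]
        intro ⟨hRd, hRm, hCd⟩
        have : R % h ≠ n := by
          intro he
          exact h1 ⟨(pvBlockEq hh hnh).2 ⟨hRd, he⟩, hCd, Nat.mod_lt _ hw⟩
        exact h2 ⟨hRd, by omega, hCd⟩

-- loop over c inside row r of blocks
theorem pvMidCols {h w : Nat} (grid : List (List Int)) (hh : 0 < h) (hw : 0 < w)
    {r : Nat} (hrh : r < h)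
    {res : List (List Int)} {f : Nat → Nat → Int}
    (hr : pvRep h w res f) (m : Nat) (hm : m ≤ w) :
    pvRep h w ((List.range m).foldl (fun res c =>
        if (grid.getD r []).getD c 0 ≠ 0 then
          (List.range h).foldl (fun res ir =>
            (List.range w).foldl (fun res ic =>
              pvSetCell res (r * h + ir) (c * w + ic) ((grid.getD ir []).getD ic 0)) res) res
        else res) res)
      (fun R C => if R / h = r ∧ C / w < m ∧ (grid.getD r []).getD (C / w) 0 ≠ 0 then
          (grid.getD (R % h) []).getD (C % w) 0 else f R C) := by
  induction m with
  | zero => simpa using pvRep_ext hr (by intro R C _ _; simp)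
  | succ n ih =>
    have hn : n ≤ w := by omega
    have hnw : n < w := by omega
    rw [List.range_succ, List.foldl_append, List.foldl_cons, List.foldl_nil]
    by_cases hz : (grid.getD r []).getD n 0 ≠ 0
    · rw [if_pos hz]
      refine pvRep_ext (pvInnerRows grid hh hw hrh hnw (ih hn) h le_rfl) ?_
      intro R C hRh hCw
      by_cases h1 : R / h = r ∧ R % h < h ∧ C / w = n
      · obtain ⟨hRd, hRm, hCd⟩ := h1
        rw [if_pos ⟨hRd, hRm, hCd⟩, if_pos ⟨hRd, by omega, by rw [hCd]; exact hz⟩]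
      · rw [if_neg h1]
        by_cases h2 : R / h = r ∧ C / w < n ∧ (grid.getD r []).getD (C / w) 0 ≠ 0
        · rw [if_pos h2, if_pos ⟨h2.1, by omega, h2.2.2⟩]
        · rw [if_neg h2, if_neg]
          intro ⟨hRd, hCd, hzz⟩
          by_cases he : C / w = n
          · exact h1 ⟨hRd, Nat.mod_lt _ hh, he⟩
          · exact h2 ⟨hRd, by omega, hzz⟩
    · rw [if_neg hz]
      refine pvRep_ext (ih hn) ?_
      intro R C _ _
      by_cases h2 : R / h = r ∧ C / w < n ∧ (grid.getD r []).getD (C / w) 0 ≠ 0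
      · rw [if_pos h2, if_pos ⟨h2.1, by omega, h2.2.2⟩]
      · rw [if_neg h2, if_neg]
        intro ⟨hRd, hCd, hzz⟩
        by_cases he : C / w = n
        · rw [he] at hzz; exact hz hzz
        · exact h2 ⟨hRd, by omega, hzz⟩

-- outer loop over r
theorem pvOuter {h w : Nat} (grid : List (List Int)) (hh : 0 < h) (hw : 0 < w)
    {res : List (List Int)} {f : Nat → Nat → Int}
    (hr : pvRep h w res f) (m : Nat) (hm : m ≤ h) :
    pvRep h w ((List.range m).foldl (fun res r =>
        (List.range w).foldl (fun res c =>
          if (grid.getD r []).getD c 0 ≠ 0 then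
            (List.range h).foldl (fun res ir =>
              (List.range w).foldl (fun res ic =>
                pvSetCell res (r * h + ir) (c * w + ic) ((grid.getD ir []).getD ic 0)) res) res
          else res) res) res)
      (fun R C => if R / h < m ∧ (grid.getD (R / h) []).getD (C / w) 0 ≠ 0 then
          (grid.getD (R % h) []).getD (C % w) 0 else f R C) := by
  induction m with
  | zero => simpa using pvRep_ext hr (by intro R C _ _; simp)
  | succ n ih =>
    have hn : n ≤ h := by omega
    have hnh : n < h := by omega
    rw [List.range_succ, List.foldl_append, List.foldl_cons, List.foldl_nil]
    refine pvRep_ext (pvMidCols grid hh hw hnh (ih hn) w le_rfl) ?_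
    intro R C hRh hCw
    have hCd : C / w < w := Nat.div_lt_of_lt_mul hCw
    by_cases h1 : R / h = n ∧ C / w < w ∧ (grid.getD n []).getD (C / w) 0 ≠ 0
    · obtain ⟨hRd, _, hz⟩ := h1
      rw [if_pos ⟨hRd, hCd, hz⟩, if_pos ⟨by omega, by rw [hRd]; exact hz⟩]
    · rw [if_neg h1]
      by_cases h2 : R / h < n ∧ (grid.getD (R / h) []).getD (C / w) 0 ≠ 0
      · rw [if_pos h2, if_pos ⟨by omega, h2.2⟩]
      · rw [if_neg h2, if_neg]
        intro ⟨hRd, hz⟩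
        by_cases he : R / h = n
        · exact h1 ⟨he, hCd, by rw [← he]; exact hz⟩
        · exact h2 ⟨by omega, hz⟩

theorem pvGetD_eq {α : Type} (l : List α) (i : Nat) (d : α) (h : i < l.length) :
    l.getD i d = l[i] := by
  simp [List.getD_eq_getElem?_getD, List.getElem?_eq_getElem h]

-- a matrix representing f is exactly B's comprehension of f
theorem pvRep_eq_map {h w : Nat} {res : List (List Int)} {f : Nat → Nat → Int}
    (hr : pvRep h w res f) :
    res = (List.range (h * h)).map (fun R => (List.range (w * w)).map (fun C => f R C)) := by
  obtain ⟨hlen, hcell⟩ := hr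
  apply List.ext_getElem
  · simp [hlen]
  · intro R hR1 hR2
    have hRlt : R < h * h := by omega
    rw [List.getElem_map, List.getElem_range]
    have hrow := pvGetD_eq res R [] hR1
    apply List.ext_getElem
    · rw [← hrow, (hcell R hRlt).1]; simp
    · intro C hC1 hC2
      have hC1' : C < (res.getD R []).length := by rw [hrow]; exact hC1
      have hClt : C < w * w := by rw [(hcell R hRlt).1] at hC1'; exact hC1'
      rw [List.getElem_map, List.getElem_range]
      have h3 := (hcell R hRlt).2 C hClt
      rw [hrow, pvGetD_eq _ C 0 hC1] at h3
      exact h3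

-- ===== VERDICT (by name: the statement is the Claim_ definition above) =====
theorem upscale_pattern_spec : Claim_equal_upscale_pattern := by
  intro grid _ _
  unfold Spec_upscale_pattern upscale_pattern upscale_pattern_alt
  by_cases hg : grid.length > 5 ∨ (grid.headD []).length > 5 ∨ grid.length = 0 ∨
      (grid.headD []).length = 0
  · simp only [hg, if_pos]
  · simp only [hg, if_neg, not_false_eq_true]
    push Not at hg
    obtain ⟨h1, h2, h3, h4⟩ := hg
    have hh : 0 < grid.length := by omega
    have hw : 0 < (grid.headD []).length := by omega
    refine pvRep_eq_map (pvRep_ext (pvOuter grid hh hw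
      (pvRep_init grid.length (grid.headD []).length) grid.length le_rfl) ?_)
    intro R C hR hC
    have hRd : R / grid.length < grid.length := Nat.div_lt_of_lt_mul hR
    by_cases hz :
        (grid.getD (R / grid.length) []).getD (C / (grid.headD []).length) 0 ≠ 0
    · rw [if_pos ⟨hRd, hz⟩, if_pos hz]
    · rw [if_neg (by tauto), if_neg hz]
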